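-- pv_equiv track=rewrite | github.com/florensacc/rllab-curriculum | sandbox/rocky/hrl/envs/image_grid_env.py | _gen_feasible_actions
-- ===== SOURCE A (Python) =====
-- def _gen_feasible_actions(action_interval):
--     """
--     Generate the list of feasible actions, given the action interval
--     """
--     k = action_interval
--
--     actions = []
--
--     for k in range(action_interval, -1, -2):
--         for inc in range(k + 1):
--             actions.append((k - inc, inc))
--             actions.append((k - inc, -inc))
--             actions.append((inc - k, -inc))
--             actions.append((inc - k, inc))
--     actions = sorted(set(actions))
--     return actions
-- ===== SOURCE B (Python) =====
-- def _gen_feasible_actions(action_interval):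
--     """
--     Generate the list of feasible actions, given the action interval
--     """
--     actions = []
--     for x in range(-action_interval, action_interval + 1):
--         r = action_interval - abs(x)
--         for y in range(-r, r + 1):
--             if (abs(x) + abs(y)) % 2 == action_interval % 2:
--                 actions.append((x, y))
--     return actions
-- ===== Notes on version B (the rewrite author's own statement) =====
-- stated objective: simpler
-- what changed: Replaces A's diamond-shell construction (four mirrored appends per shell point, then sorted(set(...))) with a single grid scan that emits each point (x,y) with |x|+|y| <= n and matching parity exactly once in lexicographic order, so no deduplication or sort is needed.
import Mathlib
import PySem

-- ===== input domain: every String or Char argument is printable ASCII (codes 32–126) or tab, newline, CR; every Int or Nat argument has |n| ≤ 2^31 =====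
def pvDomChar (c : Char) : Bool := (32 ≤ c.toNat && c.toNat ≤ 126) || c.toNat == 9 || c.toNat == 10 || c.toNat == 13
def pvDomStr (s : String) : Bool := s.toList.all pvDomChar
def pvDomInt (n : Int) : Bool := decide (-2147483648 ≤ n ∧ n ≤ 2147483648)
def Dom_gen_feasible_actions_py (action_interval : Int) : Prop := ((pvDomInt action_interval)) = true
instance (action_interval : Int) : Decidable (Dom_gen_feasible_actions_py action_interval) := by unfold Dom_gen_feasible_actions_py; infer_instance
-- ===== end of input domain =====

-- B replaces A's four-corner diamond-shell construction followed by sorted(set(...)) with a single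
-- already-sorted, duplicate-free grid scan filtered by the |x|+|y| ≤ n parity predicate (objective: simpler).

-- ===== PORT A =====
-- the inner 'for inc' loop of A: four appends per iteration
def pvAInner (k : Int) (acc : List (Int × Int)) : List (Int × Int) :=
  (PySem.List.pyRange 0 (k + 1) 1).foldl
    (fun acc2 inc => acc2 ++ [(k - inc, inc)] ++ [(k - inc, -inc)] ++ [(inc - k, -inc)] ++ [(inc - k, inc)]) acc

def gen_feasible_actions_py (action_interval : Int) : List (Int × Int) :=
  -- 'k = action_interval' is dead (the loop rebinds k); actions built by the nested loops
  let actions : List (Int × Int) :=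
    (PySem.List.pyRange action_interval (-1) (-2)).foldl (fun acc k => pvAInner k acc) []
  -- sorted(set(actions)); Python compares tuples lexicographically → key toLex
  PySem.List.sorted (PySem.Set.ofList actions) (fun p => toLex p) false

-- ===== PORT B =====
def gen_feasible_actions_py_alt (action_interval : Int) : List (Int × Int) :=
  (PySem.List.pyRange (-action_interval) (action_interval + 1) 1).foldl
    (fun acc x =>
      let r := action_interval - |x|
      (PySem.List.pyRange (-r) (r + 1) 1).foldl
        (fun acc2 y =>
          if PySem.Int.mod (|x| + |y|) 2 = PySem.Int.mod action_interval 2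
          then acc2 ++ [(x, y)] else acc2) acc) []

-- ===== PRECONDITION & SPEC =====
def Spec_gen_feasible_actions_py (action_interval : Int) (out : List (Int × Int)) : Prop := out = gen_feasible_actions_py_alt action_interval
instance (action_interval : Int) (out : List (Int × Int)) : Decidable (Spec_gen_feasible_actions_py action_interval out) := by unfold Spec_gen_feasible_actions_py; infer_instance

-- ===== CLAIM (what is proved, stated in full; the proofs are below) =====
def Claim_equal_gen_feasible_actions_py : Prop := ∀ (action_interval : Int), Dom_gen_feasible_actions_py action_interval → Spec_gen_feasible_actions_py action_interval (gen_feasible_actions_py action_interval)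

-- ===== LEMMAS AND PROOFS =====

-- A's nested append loops, written as a flatMap
theorem aActs_flat (n : Int) :
    (PySem.List.pyRange n (-1) (-2)).foldl (fun acc k => pvAInner k acc) [] =
      (PySem.List.pyRange n (-1) (-2)).flatMap (fun k =>
        (PySem.List.pyRange 0 (k + 1) 1).flatMap (fun inc =>
          [(k - inc, inc), (k - inc, -inc), (inc - k, -inc), (inc - k, inc)])) := by
  rw [PySem.List.foldl_congr_mem (g := fun acc k => acc ++
        (PySem.List.pyRange 0 (k + 1) 1).flatMap (fun inc =>
          [(k - inc, inc), (k - inc, -inc), (inc - k, -inc), (inc - k, inc)]))]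
  · exact PySem.List.foldl_append_eq_flatMap _ _ _
  · intro acc k hk
    unfold pvAInner
    rw [PySem.List.foldl_congr_mem (g := fun acc2 inc => acc2 ++
          [(k - inc, inc), (k - inc, -inc), (inc - k, -inc), (inc - k, inc)])]
    · exact PySem.List.foldl_append_eq_flatMap _ _ _
    · intro acc2 inc _; simp

-- membership in A's raw actions list: the diamond shells are exactly the parity-bounded points
theorem mem_aActs (n : Int) (p : Int × Int) :
    p ∈ (PySem.List.pyRange n (-1) (-2)).foldl (fun acc k => pvAInner k acc) [] ↔
      |p.1| + |p.2| ≤ n ∧ PySem.Int.mod (|p.1| + |p.2|) 2 = PySem.Int.mod n 2 := by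
  obtain ⟨a, b⟩ := p
  rw [aActs_flat]
  simp only [List.mem_flatMap, PySem.List.mem_pyRange_one,
    PySem.List.mem_pyRange_iff_of_neg (by norm_num : (-2:Int) < 0),
    List.mem_cons, List.not_mem_nil, or_false,
    PySem.Int.mod_eq_emod_of_pos (by norm_num : (0:Int) < 2),
    Int.abs_eq_natAbs, Int.neg_dvd, Prod.mk.injEq]
  constructor
  · rintro ⟨k, ⟨hk1, hk2, hdvd⟩, inc, ⟨h0, h1⟩, h⟩
    rcases h with ⟨ha, hb⟩ | ⟨ha, hb⟩ | ⟨ha, hb⟩ | ⟨ha, hb⟩ <;> subst ha hb <;> omega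
  · rintro ⟨hle, hp⟩
    refine ⟨(a.natAbs : Int) + (b.natAbs : Int), ⟨by omega, by omega, by omega⟩, (b.natAbs : Int), ⟨by omega, by omega⟩, ?_⟩
    by_cases ha : 0 ≤ a <;> by_cases hb : 0 ≤ b
    · exact Or.inl ⟨by omega, by omega⟩
    · exact Or.inr (Or.inl ⟨by omega, by omega⟩)
    · exact Or.inr (Or.inr (Or.inr ⟨by omega, by omega⟩))
    · exact Or.inr (Or.inr (Or.inl ⟨by omega, by omega⟩))

-- B's append loops, written as a flatMap
theorem alt_eq_flatMap (n : Int) :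
    gen_feasible_actions_py_alt n =
      (PySem.List.pyRange (-n) (n + 1) 1).flatMap (fun x =>
        ((PySem.List.pyRange (-(n - |x|)) ((n - |x|) + 1) 1).filter
          (fun y => decide (PySem.Int.mod (|x| + |y|) 2 = PySem.Int.mod n 2))).map (fun y => (x, y))) := by
  unfold gen_feasible_actions_py_alt
  rw [PySem.List.foldl_congr_mem (g := fun acc x => acc ++
        ((PySem.List.pyRange (-(n - |x|)) ((n - |x|) + 1) 1).filter
          (fun y => decide (PySem.Int.mod (|x| + |y|) 2 = PySem.Int.mod n 2))).map (fun y => (x, y)))]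
  · exact PySem.List.foldl_append_eq_flatMap _ _ _
  · intro acc x hx
    exact PySem.List.foldl_append_ite _ _ _ _

-- membership in B's list: the same parity-bounded points
theorem mem_alt (n : Int) (p : Int × Int) :
    p ∈ gen_feasible_actions_py_alt n ↔
      |p.1| + |p.2| ≤ n ∧ PySem.Int.mod (|p.1| + |p.2|) 2 = PySem.Int.mod n 2 := by
  obtain ⟨a, b⟩ := p
  rw [alt_eq_flatMap]
  simp only [List.mem_flatMap, List.mem_map, List.mem_filter, PySem.List.mem_pyRange_one,
    decide_eq_true_eq, PySem.Int.mod_eq_emod_of_pos (by norm_num : (0:Int) < 2),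
    Int.abs_eq_natAbs, Prod.mk.injEq]
  constructor
  · rintro ⟨x, hx, y, ⟨⟨hy, hp⟩, hxa, hyb⟩⟩
    subst hxa hyb
    omega
  · rintro ⟨hle, hp⟩
    exact ⟨a, by omega, b, ⟨⟨by omega, by omega⟩, rfl, rfl⟩⟩

-- B's list is strictly increasing in Python's (lexicographic) tuple order
theorem alt_pairwise (n : Int) :
    (gen_feasible_actions_py_alt n).Pairwise
      (fun a b => (toLex a : Lex (Int × Int)) < toLex b) := by
  rw [alt_eq_flatMap, List.flatMap_def, List.pairwise_flatten]
  refine ⟨?_, ?_⟩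
  · intro l hl
    simp only [List.mem_map] at hl
    obtain ⟨x, _, rfl⟩ := hl
    rw [List.pairwise_map]
    refine List.Pairwise.imp ?_ ((PySem.List.pairwise_lt_pyRange_one _ _).filter _)
    intro y1 y2 h
    exact Prod.Lex.lt_iff.mpr (Or.inr ⟨rfl, h⟩)
  · rw [List.pairwise_map]
    refine List.Pairwise.imp ?_ (PySem.List.pairwise_lt_pyRange_one _ _)
    intro x1 x2 hx p hp q hq
    simp only [List.mem_map] at hp hq
    obtain ⟨y1, _, rfl⟩ := hp
    obtain ⟨y2, _, rfl⟩ := hq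
    exact Prod.Lex.lt_iff.mpr (Or.inl hx)

-- ===== VERDICT (by name: the statement is the Claim_ definition above) =====
theorem gen_feasible_actions_py_spec : Claim_equal_gen_feasible_actions_py := by
  intro n _
  unfold Spec_gen_feasible_actions_py gen_feasible_actions_py
  apply PySem.List.sorted_eq_of_perm_of_pairwise_lt
  · rw [List.perm_ext_iff_of_nodup
      ((alt_pairwise n).imp fun h => ne_of_apply_ne toLex (ne_of_lt h))
      (PySem.Set.nodup_ofList _)]
    intro p
    rw [mem_alt, PySem.Set.mem_ofList, mem_aActs]
  · exact alt_pairwise n
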